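-- pv_equiv track=rewrite | github.com/urbanGY/everycrawling | everycrawling/link_crawling.py | remove_blank
-- ===== SOURCE A (Python) =====
-- def remove_blank(s): #입력 스트링의 공백 제거
--     remove = ''
--     for c in s:
--         if c == '\n' or c == '(': # 보통 괄호는 한글 제목의 영문을 표기하기위해 쓰임으로 필터링 결정
--             break;
--         if c != ' ':
--             remove += c
--     return remove
-- ===== SOURCE B (Python) =====
-- def remove_blank(s):
--     cut = next((i for i, c in enumerate(s) if c in '\n('), len(s))
--     return s[:cut].replace(' ', '')
-- ===== Notes on version B (the rewrite author's own statement) =====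
-- stated objective: simpler
-- what changed: Replaces the accumulating char-by-char loop with break by a locate-then-transform pipeline: find the first newline/paren index (defaulting to len(s)), slice up to it, and strip spaces with str.replace.
import Mathlib
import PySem

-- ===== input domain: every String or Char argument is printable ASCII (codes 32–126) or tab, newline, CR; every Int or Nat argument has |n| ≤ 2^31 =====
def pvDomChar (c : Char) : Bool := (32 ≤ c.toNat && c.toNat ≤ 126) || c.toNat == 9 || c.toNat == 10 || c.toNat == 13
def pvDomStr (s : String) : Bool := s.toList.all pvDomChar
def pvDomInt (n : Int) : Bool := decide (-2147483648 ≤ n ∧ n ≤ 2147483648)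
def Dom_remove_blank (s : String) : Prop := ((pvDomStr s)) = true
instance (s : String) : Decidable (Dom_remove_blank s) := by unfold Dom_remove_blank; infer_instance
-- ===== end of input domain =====

-- B replaces A's accumulating loop-with-break by a locate-then-transform pipeline (find cut index, slice, replace): simpler decomposition, same values.

-- ===== PORT A =====
-- the loop 'for c in s: break/accumulate' of A, acc = the string built so far
def remove_blank_goA (acc : List Char) : List Char → List Char
  | [] => acc
  | c :: cs =>
    if c = '\n' ∨ c = '(' then acc
    else remove_blank_goA (if c ≠ ' ' then acc ++ [c] else acc) cs

def remove_blank (s : String) : String :=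
  String.ofList (remove_blank_goA [] s.toList)

-- ===== PORT B =====
-- next((i for i,c in enumerate(s) if c in '\n('), len(s)) is List.findIdx (returns length when absent)
def remove_blank_alt (s : String) : String :=
  let cut : Nat := s.toList.findIdx (fun c => c == '\n' || c == '(')
  String.ofList (PySem.Chars.replace (PySem.List.slice s.toList none (some (cut : Int))) [' '] [])

-- ===== PRECONDITION & SPEC =====
def Spec_remove_blank (s : String) (out : String) : Prop := out = remove_blank_alt s
instance (s : String) (out : String) : Decidable (Spec_remove_blank s out) := by unfold Spec_remove_blank; infer_instance

-- ===== CLAIM (what is proved, stated in full; the proofs are below) =====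
def Claim_equal_remove_blank : Prop := ∀ (s : String), Dom_remove_blank s → Spec_remove_blank s (remove_blank s)

-- ===== LEMMAS AND PROOFS =====

-- replace with old = [' '], new = [] is exactly the space filter
theorem replace_go_space (fuel : Nat) (l acc : List Char) (h : l.length ≤ fuel) :
    PySem.Chars.replace.go [' '] [] fuel l acc = acc.reverse ++ l.filter (fun c => !(c == ' ')) := by
  induction fuel generalizing l acc with
  | zero =>
    cases l with
    | nil => simp [PySem.Chars.replace.go]
    | cons c cs => simp at h
  | succ n ih =>
    cases l with
    | nil => simp [PySem.Chars.replace.go]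
    | cons c cs =>
      simp only [List.length_cons, Nat.succ_le_succ_iff] at h
      by_cases hc : c = ' '
      · subst hc
        have hp : List.isPrefixOf [' '] (' ' :: cs) = true := by simp [List.isPrefixOf]
        simp [PySem.Chars.replace.go, hp, ih cs acc h]
      · have hp : List.isPrefixOf [' '] (c :: cs) = false := by
          simp [List.isPrefixOf]; exact fun h' => hc h'.symm
        simp [PySem.Chars.replace.go, hp, ih cs (c :: acc) h, hc]

theorem replace_space (l : List Char) :
    PySem.Chars.replace l [' '] [] = l.filter (fun c => !(c == ' ')) := by
  simpa using replace_go_space l.length l [] le_rfl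

-- A's loop computes: acc ++ filter of the prefix before the first '\n' or '('
theorem goA_eq (l acc : List Char) :
    remove_blank_goA acc l =
      acc ++ (l.take (l.findIdx (fun c => c == '\n' || c == '('))).filter (fun c => !(c == ' ')) := by
  induction l generalizing acc with
  | nil => simp [remove_blank_goA]
  | cons c cs ih =>
    by_cases hb : c = '\n' ∨ c = '('
    · have hf : (fun c => c == '\n' || c == '(') c = true := by
        rcases hb with h | h <;> simp [h]
      simp [remove_blank_goA, hb, List.findIdx_cons, hf]
    · have hf : (fun c => c == '\n' || c == '(') c = false := by
        simp only [not_or] at hb; simp [hb.1, hb.2]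
      by_cases hc : c = ' '
      · subst hc
        simp [remove_blank_goA, List.findIdx_cons, ih]
      · simp [remove_blank_goA, hb, List.findIdx_cons, hf, ih, hc]

-- ===== VERDICT (by name: the statement is the Claim_ definition above) =====
theorem remove_blank_spec : Claim_equal_remove_blank := by
  intro s _
  simp [Spec_remove_blank, remove_blank, remove_blank_alt, PySem.List.slice_to, replace_space, goA_eq]
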